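-- pv_equiv track=rewrite | github.com/goeasyonng/codingtest | 프로그래머스/lv1/17681. ［1차］ 비밀지도/［1차］ 비밀지도.py | solution
-- ===== SOURCE A (Python) =====
-- def solution(n, arr1, arr2):
--     re=0 #다시 생성되는 몫
--     to=0 #몫
--     a=0 #나머지
--     sum=0 #이진수의 길이
--     ar1=[]
--     ar2=[]
--     arsum1=[]
--     arsum2=[]
--     #이진수 구하는 공식
--     for i in range(len(arr1)):
--         re=arr1[i]
--
--         while(sum<n):
--             if re!=0:
--                 to=re//2
--                 a=re%2
--                 ar1.append(a)
--                 sum+=1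
--                 re=to
--             else:
--                 ar1.append(0)
--                 sum+=1
--         sum=0
--         ar1.reverse()
--         arsum1.append("".join(map(str, ar1)))
--         ar1=[]
--
--
--
--     for i in range(len(arr2)):
--         re=arr2[i]
--
--         while(sum<n):
--             if re!=0:
--                 to=re//2
--                 a=re%2
--                 ar2.append(a)
--                 sum+=1
--                 re=to
--             else:
--                 ar2.append(0)
--                 sum+=1
--         sum=0
--         ar2.reverse()
--         arsum2.append("".join(map(str, ar2)))
--         ar2=[]
--
--     rear1=""
--     rear2=""
--     resumar = ""
--     answer=[]
--
--     for k in range(n):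
--         rear1=arsum1[k]
--         rear2=arsum2[k]
--
--         for p in range(n):
--             if rear1[p] == "1" or rear2[p] =="1" :
--                 resumar+="#"
--             else :
--                 resumar+=" "
--         answer.append(resumar)
--         resumar=""
--
--     return answer
-- ===== SOURCE B (Python) =====
-- def solution(n, arr1, arr2):
--     # One sentence: simpler — one integer OR + mask + binary formatting per row
--     # replaces A's two manual base-2 extraction loops and the per-character OR pass.
--     table = str.maketrans("10", "# ")
--     return [format((arr1[k] | arr2[k]) & ((1 << n) - 1), "b").zfill(n).translate(table)
--             for k in range(n)]
-- ===== Notes on version B (the rewrite author's own statement) =====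
-- stated objective: simpler
-- what changed: B replaces A's per-element manual base-2 extraction loops (floor-div/mod digit building for both arrays, string join, then a per-character OR comparison pass) with a single integer OR per row, masked to the low n bits and formatted as a zero-padded binary string whose digits are translated to '#'/' '.
import Mathlib
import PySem

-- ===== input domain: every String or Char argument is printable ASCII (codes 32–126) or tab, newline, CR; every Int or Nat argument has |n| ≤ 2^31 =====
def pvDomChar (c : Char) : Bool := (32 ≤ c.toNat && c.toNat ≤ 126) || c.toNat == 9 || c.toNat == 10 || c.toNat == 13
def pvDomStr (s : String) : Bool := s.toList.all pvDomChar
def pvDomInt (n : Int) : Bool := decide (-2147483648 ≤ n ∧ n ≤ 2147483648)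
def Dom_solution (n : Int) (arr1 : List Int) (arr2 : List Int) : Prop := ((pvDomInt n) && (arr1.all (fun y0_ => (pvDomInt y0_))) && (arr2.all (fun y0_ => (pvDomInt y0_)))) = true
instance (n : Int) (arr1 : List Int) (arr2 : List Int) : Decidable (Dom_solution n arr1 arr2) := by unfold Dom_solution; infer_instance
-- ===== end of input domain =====

-- One line: B replaces A's manual base-2 digit-extraction loops and per-character OR pass
-- with one integer OR per row, masked to n bits and formatted as a binary string (objective: simpler).

-- ===== PORT A =====
-- the inner `while sum < n` loop of A: runs (n - sum) more times, appending one digit each round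
def pvBitLoop : Int → Nat → List Int → List Int
  | _, 0, acc => acc
  | re, f+1, acc =>
      if re ≠ 0 then pvBitLoop (PySem.Int.floordiv re 2) f (acc ++ [PySem.Int.mod re 2])
      else pvBitLoop re f (acc ++ [0])

-- one outer-loop body of A: digits of x, reversed, joined with str()
def pvRowA (x : Int) (n : Int) : List Char :=
  ((pvBitLoop x n.toNat []).reverse).flatMap (fun b => (PySem.Int.toStr b).toList)

def solution (n : Int) (arr1 : List Int) (arr2 : List Int) : List String :=
  let arsum1 := (PySem.List.pyRange 0 (arr1.length : Int) 1).foldl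
      (fun acc i => acc ++ [pvRowA (PySem.List.pyGetD arr1 i 0) n]) []
  let arsum2 := (PySem.List.pyRange 0 (arr2.length : Int) 1).foldl
      (fun acc i => acc ++ [pvRowA (PySem.List.pyGetD arr2 i 0) n]) []
  (PySem.List.pyRange 0 n 1).foldl (fun answer k =>
    let rear1 := PySem.List.pyGetD arsum1 k []
    let rear2 := PySem.List.pyGetD arsum2 k []
    let resumar := (PySem.List.pyRange 0 n 1).foldl (fun r p =>
      r ++ [if PySem.List.pyGetD rear1 p ' ' = '1' ∨ PySem.List.pyGetD rear2 p ' ' = '1'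
            then '#' else ' ']) []
    answer ++ [String.mk resumar]) []

-- ===== PORT B =====
-- format(m, 'b') for m : Nat
def pvFmtB : Nat → List Char
  | 0 => ['0']
  | 1 => ['1']
  | m+2 => pvFmtB ((m+2)/2) ++ [if (m+2) % 2 = 1 then '1' else '0']

-- str.maketrans("10", "# ") applied to one char
def pvTrans (c : Char) : Char := if c = '1' then '#' else if c = '0' then ' ' else c

def solution_alt (n : Int) (arr1 : List Int) (arr2 : List Int) : List String :=
  (PySem.List.pyRange 0 n 1).map (fun k =>
    let v := PySem.Int.band
      (PySem.Int.bor (PySem.List.pyGetD arr1 k 0) (PySem.List.pyGetD arr2 k 0))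
      (((1:Int) <<< n.toNat) - 1)
    let s := pvFmtB v.toNat
    String.mk ((List.replicate (n.toNat - s.length) '0' ++ s).map pvTrans))

-- ===== PRECONDITION & SPEC =====
-- A raises IndexError (at arsum1[k] / arsum2[k]) exactly when n exceeds the length of arr1 or of arr2.
def Pre_solution (n : Int) (arr1 : List Int) (arr2 : List Int) : Prop :=
  n ≤ (arr1.length : Int) ∧ n ≤ (arr2.length : Int)
instance (n : Int) (arr1 : List Int) (arr2 : List Int) : Decidable (Pre_solution n arr1 arr2) := by
  unfold Pre_solution; infer_instance
def pvWitness_solution : Int × List Int × List Int := (2, ([1, 2], [3, 0]))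

def Spec_solution (n : Int) (arr1 : List Int) (arr2 : List Int) (out : List String) : Prop := out = solution_alt n arr1 arr2
instance (n : Int) (arr1 : List Int) (arr2 : List Int) (out : List String) : Decidable (Spec_solution n arr1 arr2 out) := by unfold Spec_solution; infer_instance

-- ===== CLAIM (what is proved, stated in full; the proofs are below) =====
def Claim_equal_solution : Prop := ∀ (n : Int) (arr1 : List Int) (arr2 : List Int), Dom_solution n arr1 arr2 → Pre_solution n arr1 arr2 → Spec_solution n arr1 arr2 (solution n arr1 arr2)

-- ===== LEMMAS AND PROOFS =====

-- canonical little-endian digit list extracted by A's while-loop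
def bitsL : Int → Nat → List Int
  | _, 0 => []
  | x, N+1 => PySem.Int.mod x 2 :: bitsL (PySem.Int.floordiv x 2) N

-- canonical little-endian digit characters of a natural number
def binN : Nat → Nat → List Char
  | _, 0 => []
  | m, N+1 => (if m % 2 = 1 then '1' else '0') :: binN (m/2) N

theorem bitsL_length (x : Int) (N : Nat) : (bitsL x N).length = N := by
  induction N generalizing x with
  | zero => rfl
  | succ N ih => simp [bitsL, ih]

theorem bitsL_mem01 (x : Int) (N : Nat) : ∀ t ∈ bitsL x N, t = 0 ∨ t = 1 := by
  induction N generalizing x with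
  | zero => simp [bitsL]
  | succ N ih =>
      intro t ht
      rcases List.mem_cons.mp ht with h | h
      · subst h
        have h0 := PySem.Int.mod_nonneg x (b := 2) (by norm_num)
        have h1 := PySem.Int.mod_lt x (b := 2) (by norm_num)
        omega
      · exact ih _ t h

theorem pvBitLoop_eq (f : Nat) : ∀ (x : Int) (acc : List Int), pvBitLoop x f acc = acc ++ bitsL x f := by
  induction f with
  | zero => intro x acc; simp [pvBitLoop, bitsL]
  | succ f ih =>
      intro x acc
      by_cases hx : x = 0
      · subst hx
        simp [pvBitLoop, bitsL, ih]
      · simp [pvBitLoop, bitsL, hx, ih]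

theorem pvEmodDiv (x P : Int) (hP : 0 < P) : (x % (2*P)) / 2 = (x / 2) % P := by
  have hP2 : (0:Int) < 2*P := by linarith
  have h0 : 0 ≤ x % (2*P) := Int.emod_nonneg x hP2.ne'
  have h1 := Int.emod_lt_of_pos x hP2
  have hq : x = x % (2*P) + P * (x/(2*P)) * 2 := by
    rw [show x % (2*P) + P*(x/(2*P))*2 = x % (2*P) + 2*P*(x/(2*P)) from by ring, Int.emod_add_mul_ediv]
  rw [eq_comm]
  nth_rewrite 1 [hq]
  rw [Int.add_mul_ediv_right _ _ two_ne_zero, Int.add_mul_emod_self_left,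
     Int.emod_eq_of_lt (by omega) (by omega)]

-- the low N digits of x % 2^N are those of x
theorem bitsL_emod (N : Nat) : ∀ x : Int, bitsL (x % (2:Int)^N) N = bitsL x N := by
  induction N with
  | zero => intro x; rfl
  | succ N ih =>
      intro x
      have hP : (0:Int) < 2^N := by positivity
      have hD : ((2:Int) ∣ 2^(N+1)) := ⟨2^N, by ring⟩
      simp only [bitsL]
      congr 1
      · rw [PySem.Int.mod_eq_emod_of_pos (by norm_num), PySem.Int.mod_eq_emod_of_pos (by norm_num),
           Int.emod_emod_of_dvd x hD]
      · rw [PySem.Int.floordiv_eq_ediv_of_pos (by norm_num), PySem.Int.floordiv_eq_ediv_of_pos (by norm_num),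
            show (2:Int)^(N+1) = 2 * 2^N from by ring, pvEmodDiv x _ hP, ih]

theorem pvH1 (a b : Int) : PySem.Int.mod (PySem.Int.bor a b) 2 =
    if PySem.Int.mod a 2 = 1 ∨ PySem.Int.mod b 2 = 1 then 1 else 0 := by
  simp only [PySem.Int.mod_eq_emod_of_pos (by norm_num : (0:Int) < 2)]
  unfold PySem.Int.bor
  by_cases ha : 0 ≤ a <;> by_cases hb : 0 ≤ b <;> simp only [ha, hb, if_pos, if_neg, not_false_iff]
  · have h1 := @Nat.or_mod_two_eq_one a.toNat b.toNat
    split_ifs with h <;> omega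
  · have h1 := @Nat.and_mod_two_eq_one (-b-1).toNat a.toNat
    have h2 : ((-b-1).toNat &&& a.toNat) ≤ (-b-1).toNat := Nat.and_le_left
    split_ifs with h <;> omega
  · have h1 := @Nat.and_mod_two_eq_one (-a-1).toNat b.toNat
    have h2 : ((-a-1).toNat &&& b.toNat) ≤ (-a-1).toNat := Nat.and_le_left
    split_ifs with h <;> omega
  · have h1 := @Nat.and_mod_two_eq_one (-a-1).toNat (-b-1).toNat
    split_ifs with h <;> omega

theorem pvSubAndDiv (k m : Nat) : (k - (k &&& m)) / 2 = k/2 - (k/2 &&& m/2) := by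
  have h1 : (k &&& m) ≤ k := Nat.and_le_left
  have h2 : k/2 &&& m/2 = (k &&& m)/2 := (Nat.and_div_two).symm
  have h3 := @Nat.and_mod_two_eq_one k m
  omega

theorem pvH2 (a b : Int) : PySem.Int.floordiv (PySem.Int.bor a b) 2 =
    PySem.Int.bor (PySem.Int.floordiv a 2) (PySem.Int.floordiv b 2) := by
  simp only [PySem.Int.floordiv_eq_ediv_of_pos (by norm_num : (0:Int) < 2)]
  unfold PySem.Int.bor
  by_cases ha : 0 ≤ a <;> by_cases hb : 0 ≤ b <;>
    simp only [ha, hb, if_pos, if_neg, not_false_iff]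
  · rw [if_pos (by positivity), if_pos (by positivity)]
    rw [show (a/2).toNat = a.toNat/2 from by omega, show (b/2).toNat = b.toNat/2 from by omega]
    have h := @Nat.or_div_two a.toNat b.toNat
    omega
  · rw [if_pos (by positivity), if_neg (by omega)]
    have h := pvSubAndDiv (-b-1).toNat a.toNat
    have h1 : ((-b-1).toNat &&& a.toNat) ≤ (-b-1).toNat := Nat.and_le_left
    rw [show (-(b/2)-1).toNat = (-b-1).toNat/2 from by omega, show (a/2).toNat = a.toNat/2 from by omega]
    omega
  · rw [if_neg (by omega), if_pos (by positivity)]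
    have h := pvSubAndDiv (-a-1).toNat b.toNat
    have h1 : ((-a-1).toNat &&& b.toNat) ≤ (-a-1).toNat := Nat.and_le_left
    rw [show (-(a/2)-1).toNat = (-a-1).toNat/2 from by omega, show (b/2).toNat = b.toNat/2 from by omega]
    omega
  · rw [if_neg (by omega), if_neg (by omega)]
    have h := @Nat.and_div_two (-a-1).toNat (-b-1).toNat
    rw [show (-(a/2)-1).toNat = (-a-1).toNat/2 from by omega, show (-(b/2)-1).toNat = (-b-1).toNat/2 from by omega]
    omega

-- the digits of (a | b) are the pointwise OR of the digits
theorem bitsL_bor (N : Nat) : ∀ a b : Int, bitsL (PySem.Int.bor a b) N =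
    List.zipWith (fun p q => if p = 1 ∨ q = 1 then (1:Int) else 0) (bitsL a N) (bitsL b N) := by
  induction N with
  | zero => intro a b; rfl
  | succ N ih =>
      intro a b
      simp only [bitsL, List.zipWith]
      congr 1
      · exact pvH1 a b
      · rw [pvH2 a b]; exact ih _ _

theorem pvBandMask (c : Int) (N : Nat) : PySem.Int.band c ((2:Int)^N - 1) = c % ((2:Int)^N) := by
  have hP : (1:Nat) ≤ 2^N := Nat.one_le_two_pow
  set P := (2:Nat)^N with hPdef
  have hPX : ((2:Int)^N) = (P : Int) := rfl
  rw [hPX]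
  have hmask : (0:Int) ≤ (P:Int) - 1 := by omega
  have h2 : ((P:Int) - 1).toNat = P - 1 := by omega
  unfold PySem.Int.band
  by_cases hc : 0 ≤ c
  · rw [if_pos hc, if_pos hmask, h2, Nat.and_two_pow_sub_one_eq_mod c.toNat N]
    rw [show c = (c.toNat : Int) from by omega, ← Int.natCast_emod]
    rfl
  · rw [if_neg hc, if_pos hmask, h2]
    set k := (-c-1).toNat with hk
    have h3 : (P - 1) &&& k = k % P := by
      rw [Nat.and_comm]; exact Nat.and_two_pow_sub_one_eq_mod k N
    rw [h3]
    have hdmZ : (P:Int) * ((k/P : Nat) : Int) + ((k%P : Nat) : Int) = (k : Int) := by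
      exact_mod_cast congrArg (Nat.cast : Nat → Int) (Nat.div_add_mod k P)
    have hltP : k % P < P := Nat.mod_lt _ (by omega)
    have hc2 : c = -((k:Int)+1) := by omega
    have hw : ((P - 1 - k % P : Nat) : Int) = (P:Int) - 1 - ((k%P : Nat):Int) := by omega
    have key : c + (P:Int) * (((k/P : Nat) : Int) + 1) = (P:Int) - 1 - ((k%P : Nat):Int) := by
      rw [hc2]; linear_combination hdmZ
    calc (↑(P - 1 - k % P) : Int)
        = ((P:Int) - 1 - ((k%P : Nat):Int)) % ↑P := by
          rw [← hw, Int.emod_eq_of_lt (by omega) (by omega)]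
      _ = (c + (P:Int) * (((k/P : Nat) : Int) + 1)) % ↑P := by rw [key]
      _ = c % ↑P := by rw [Int.add_mul_emod_self_left]

theorem binN_zero (N : Nat) : binN 0 N = List.replicate N '0' := by
  induction N with
  | zero => rfl
  | succ N ih => simp [binN, ih, List.replicate_succ]

-- zero-padded format(m,'b') is the reversed little-endian digit string
theorem padN (N : Nat) : ∀ m : Nat, m < 2^N → 1 ≤ N →
    List.replicate (N - (pvFmtB m).length) '0' ++ pvFmtB m = (binN m N).reverse := by
  induction N with
  | zero => omega
  | succ N ih =>
      intro m hm _
      simp only [binN, List.reverse_cons]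
      match m with
      | 0 =>
          rw [binN_zero, List.reverse_replicate]
          simp [pvFmtB, ← List.replicate_succ']
      | 1 =>
          rw [show (1:Nat)/2 = 0 from rfl, binN_zero, List.reverse_replicate]
          simp [pvFmtB]
      | m+2 =>
          have hN : 1 ≤ N := by
            by_contra h
            interval_cases N
            omega
          have ih2 := ih ((m+2)/2) (by omega) hN
          rw [show pvFmtB (m+2) = pvFmtB ((m+2)/2) ++ [if (m+2) % 2 = 1 then '1' else '0'] from by simp [pvFmtB]]
          rw [← ih2]
          simp only [List.length_append, List.length_cons, List.length_nil]
          rw [show N + 1 - ((pvFmtB ((m+2)/2)).length + 1) = N - (pvFmtB ((m+2)/2)).length from by omega]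
          simp [List.append_assoc]

-- little-endian digits of a natural number, as characters
theorem bitsL_toChar (N : Nat) : ∀ m : Nat,
    (bitsL (↑m) N).map (fun t => if t = 1 then '1' else '0') = binN m N := by
  induction N with
  | zero => intro m; rfl
  | succ N ih =>
      intro m
      simp only [bitsL, binN, List.map]
      congr 1
      · rw [PySem.Int.mod_eq_emod_of_pos (by norm_num)]
        have : ((m:Int)) % 2 = ((m % 2 : Nat) : Int) := by exact_mod_cast (Int.natCast_emod m 2).symm
        rw [this]
        rcases Nat.mod_two_eq_zero_or_one m with h | h <;> simp [h]
      · rw [PySem.Int.floordiv_eq_ediv_of_pos (by norm_num),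
            show ((m:Int)) / 2 = ((m / 2 : Nat) : Int) from by exact_mod_cast (Int.natCast_div m 2).symm]
        exact ih _

theorem pvFlatMapToStr (l : List Int) (h : ∀ t ∈ l, t = 0 ∨ t = 1) :
    l.flatMap (fun b => (PySem.Int.toStr b).toList) = l.map (fun t => if t = 1 then '1' else '0') := by
  induction l with
  | nil => rfl
  | cons x xs ih =>
      simp only [List.flatMap_cons, List.map_cons]
      rw [ih (fun t ht => h t (List.mem_cons_of_mem _ ht))]
      rcases h x List.mem_cons_self with h0 | h0 <;> subst h0 <;> rfl

theorem pvRowA_eq (x : Int) (n : Int) :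
    pvRowA x n = (bitsL x n.toNat).reverse.map (fun t => if t = 1 then '1' else '0') := by
  unfold pvRowA
  rw [pvBitLoop_eq, List.nil_append,
     pvFlatMapToStr _ (fun t ht => bitsL_mem01 x n.toNat t (List.mem_reverse.mp ht))]

-- the padded binary rendering of 0 ≤ v < 2^N equals the reversed digit chars of v
theorem padB (N : Nat) (v : Int) (hN : 1 ≤ N) (h0 : 0 ≤ v) (h1 : v < (2:Int)^N) :
    List.replicate (N - (pvFmtB v.toNat).length) '0' ++ pvFmtB v.toNat
      = (bitsL v N).reverse.map (fun t => if t = 1 then '1' else '0') := by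
  have hPX : ((2:Int)^N) = ((2^N : Nat) : Int) := rfl
  have hm : v.toNat < 2^N := by omega
  rw [List.map_reverse]
  conv_rhs => rw [show v = ((v.toNat : Nat) : Int) from by omega, bitsL_toChar]
  exact padN N v.toNat hm hN

-- ===== VERDICT (by name: the statement is the Claim_ definition above) =====
theorem solution_spec : Claim_equal_solution := by
  unfold Claim_equal_solution
  intro n arr1 arr2 _ hpre
  obtain ⟨hl1, hl2⟩ := hpre
  unfold Spec_solution
  simp only [solution, solution_alt, PySem.List.foldl_append_singleton_eq_map, List.nil_append]
  apply List.map_congr_left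
  intro k hk
  obtain ⟨hk0, hkn⟩ := PySem.List.mem_pyRange_one.mp hk
  rw [PySem.List.pyGetD_map_pyRange_of_nonneg _ _ _ _ hk0 (by omega),
      PySem.List.pyGetD_map_pyRange_of_nonneg _ _ _ _ hk0 (by omega)]
  set a := PySem.List.pyGetD arr1 k 0 with ha
  set b := PySem.List.pyGetD arr2 k 0 with hb
  set N := n.toNat with hN
  have hN1 : 1 ≤ N := by omega
  have hNn : ((N : Nat) : Int) = n := by omega
  rw [pvRowA_eq a n, pvRowA_eq b n]
  rw [Int.shiftLeft_eq, one_mul, pvBandMask]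
  have hP : (0:Int) < 2^N := by positivity
  set c := PySem.Int.bor a b with hc
  have hv0 : 0 ≤ c % 2^N := Int.emod_nonneg c hP.ne'
  have hv1 : c % 2^N < 2^N := Int.emod_lt_of_pos c hP
  rw [padB N _ hN1 hv0 hv1, bitsL_emod, bitsL_bor]
  congr 1
  rw [← hNn, PySem.List.pyRange_zero_natCast, List.map_map]
  apply List.ext_getElem
  · simp [bitsL_length]
  · intro i hi1 hi2
    simp only [List.getElem_map, List.getElem_range, Function.comp, Int.toNat_natCast]
    have hiN : i < N := by simpa [bitsL_length] using hi2
    have hlen1 : i < (List.map (fun t => if t = 1 then '1' else '0') (bitsL a N).reverse).length := by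
      simp [bitsL_length]; omega
    have hlen2 : i < (List.map (fun t => if t = 1 then '1' else '0') (bitsL b N).reverse).length := by
      simp [bitsL_length]; omega
    rw [PySem.List.pyGetD_natCast, PySem.List.pyGetD_natCast,
        List.getD_eq_getElem _ _ hlen1, List.getD_eq_getElem _ _ hlen2]
    simp only [List.getElem_map, List.getElem_reverse, List.getElem_zipWith,
               List.length_zipWith, bitsL_length, min_self]
    rcases bitsL_mem01 a N _ (List.getElem_mem _) with h | h <;>
      rcases bitsL_mem01 b N _ (List.getElem_mem _) with h2 | h2 <;>
      rw [h, h2] <;> simp [pvTrans]
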